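-- pv_equiv track=rewrite | github.com/AlbertLlica/SEGURIDAD-LAB | backend/main.py | route_cipher
-- ===== SOURCE A (Python) =====
-- import math
--
-- def route_cipher(text="", mode='encrypt', step_size=4):
--
--     if mode == 'encrypt':
--         idx = 0
--         matrix_representation = []
--         encrypted_text = ""
--
--
--         for i in range(math.ceil(len(text) / step_size)):
--             matrix_row = []
--             for j in range(step_size):
--                 if i * step_size + j < len(text):
--                     matrix_row.append(text[i * step_size + j])
--                 else:
--                     matrix_row.append("-")
--             matrix_representation.append(matrix_row)
--
--         matrix_width = len(matrix_representation[0])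
--         matrix_height = len(matrix_representation)
--         allowed_depth = min(matrix_width, matrix_height) // 2
--
--
--         for i in range(allowed_depth):
--
--             for j in range(i, matrix_height - i - 1):
--                 encrypted_text += matrix_representation[j][matrix_width - i - 1]
--             for j in range(matrix_width - i - 1, i, -1):
--                 encrypted_text += matrix_representation[matrix_height - i - 1][j]
--             for j in range(matrix_height - i - 1, i, -1):
--                 encrypted_text += matrix_representation[j][i]
--             for j in range(i, matrix_width - i - 1):
--                 encrypted_text += matrix_representation[i][j]
--
--         return encrypted_text
--
--     elif mode == 'decrypt':
--         idx = 0
--         plain_text = ""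
--         matrix_width = step_size
--         matrix_height = math.ceil(len(text) / step_size)
--
--         allowed_depth = min(matrix_width, matrix_height) // 2
--         plain_text_matrix = [[' ' for _ in range(matrix_width)] for _ in range(matrix_height)]
--
--         for i in range(allowed_depth):
--
--             for j in range(i, matrix_height - i - 1):
--                     plain_text_matrix[j][matrix_width - i - 1] = text[idx]
--                     idx += 1
--             for j in range(matrix_width - i - 1, i, -1):
--                     plain_text_matrix[matrix_height - i - 1][j] = text[idx]
--                     idx += 1
--             for j in range(matrix_height - i - 1, i, -1):
--                     plain_text_matrix[j][i] = text[idx]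
--                     idx += 1
--             for j in range(i, matrix_width - i - 1):
--                     plain_text_matrix[i][j] = text[idx]
--                     idx += 1
--
--         for i in range(matrix_height):
--             for j in range(matrix_width):
--                 plain_text += plain_text_matrix[i][j]
--
--         return plain_text.replace("-", "").strip()
-- ===== SOURCE B (Python) =====
-- def route_cipher(text="", mode='encrypt', step_size=4):
--     # Closed-form spiral rank: instead of traversing the spiral, compute for each
--     # cell (r, c) its position in the spiral order arithmetically, then sort
--     # (encrypt) or index the text directly (decrypt).
--     if mode not in ('encrypt', 'decrypt'):
--         return None
--     n = len(text)
--     w = step_size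
--     h = -(-n // w)          # ceil(n / w); ZeroDivisionError when w == 0, like A
--     d = min(w, h) // 2
--
--     def rank(r, c):
--         # spiral layer of the cell; None if the spiral never visits it
--         i = min(r, c, h - 1 - r, w - 1 - c)
--         if i >= d:
--             return None
--         base = 2 * i * (w + h - 2) - 4 * i * (i - 1)
--         if c == w - 1 - i and r < h - 1 - i:            # right column, going down
--             return base + (r - i)
--         if r == h - 1 - i:                              # bottom row, right to left
--             return base + (h - 2 * i - 1) + (w - 1 - i - c)
--         if c == i:                                      # left column, going up
--             return base + (h - 2 * i - 1) + (w - 2 * i - 1) + (h - 1 - i - r)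
--         return base + 2 * (h - 2 * i - 1) + (w - 2 * i - 1) + (c - i)  # top row
--
--     if mode == 'encrypt':
--         cells = []
--         for r in range(h):
--             for c in range(w):
--                 k = rank(r, c)
--                 if k is not None:
--                     cells.append((k, text[r * w + c] if r * w + c < n else '-'))
--         cells.sort(key=lambda p: p[0])
--         return ''.join(ch for _, ch in cells)
--     elif mode == 'decrypt':
--         out = []
--         for r in range(h):
--             for c in range(w):
--                 k = rank(r, c)
--                 out.append(text[k] if k is not None else ' ')
--         return ''.join(out).replace('-', '').strip()
-- ===== Notes on version B (the rewrite author's own statement) =====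
-- stated objective: alternative
-- what changed: B never traverses the spiral: it computes each cell's spiral position by a closed-form arithmetic rank (layer from min of the four border distances, plus an affine per-side offset), then for encrypt sorts the (rank, char) pairs and for decrypt indexes the text directly per row-major cell, replacing A's matrix building and four boundary-shrinking loops per layer.
import Mathlib
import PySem

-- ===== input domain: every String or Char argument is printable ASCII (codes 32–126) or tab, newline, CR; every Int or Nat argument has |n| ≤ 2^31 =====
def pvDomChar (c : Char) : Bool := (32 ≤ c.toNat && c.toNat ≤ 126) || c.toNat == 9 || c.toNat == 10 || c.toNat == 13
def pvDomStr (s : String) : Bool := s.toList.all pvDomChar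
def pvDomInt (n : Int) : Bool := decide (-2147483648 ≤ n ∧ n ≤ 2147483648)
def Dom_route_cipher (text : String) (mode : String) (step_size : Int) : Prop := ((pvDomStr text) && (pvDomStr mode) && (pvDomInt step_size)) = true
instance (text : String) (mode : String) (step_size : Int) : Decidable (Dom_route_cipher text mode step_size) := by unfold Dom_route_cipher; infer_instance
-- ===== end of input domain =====

-- B never traverses the spiral: it computes each cell's spiral position by a closed-form
-- arithmetic rank and then sorts the (rank, char) pairs (encrypt) / indexes the text per
-- row-major cell (decrypt); same task, different algorithm (objective: alternative).

-- ===== PORT A =====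
-- A-side helpers: one def per Python loop of A, transliterated fold by fold.
-- math.ceil(len(text)/step_size) is ported as -((-n) // step) — exact on the stated domain.

-- the padded-matrix build loop of encrypt
def buildMatrixA (chars : List Char) (s h : Int) : List (List Char) :=
  (PySem.List.pyRange 0 h 1).foldl (fun m i =>
    m ++ [(PySem.List.pyRange 0 s 1).foldl (fun row j =>
      row ++ [if i * s + j < (PySem.List.len chars) then PySem.List.pyGetD chars (i * s + j) '-' else '-']) []]) []

-- the spiral read loop of encrypt (matrix accesses are in range under Pre_)
def spiralReadA (matrix : List (List Char)) (w hh d : Int) : List Char :=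
  (PySem.List.pyRange 0 d 1).foldl (fun acc i =>
    let acc := (PySem.List.pyRange i (hh - i - 1) 1).foldl (fun a j =>
      a ++ [PySem.List.pyGetD (PySem.List.pyGetD matrix j []) (w - i - 1) ' ']) acc
    let acc := (PySem.List.pyRange (w - i - 1) i (-1)).foldl (fun a j =>
      a ++ [PySem.List.pyGetD (PySem.List.pyGetD matrix (hh - i - 1) []) j ' ']) acc
    let acc := (PySem.List.pyRange (hh - i - 1) i (-1)).foldl (fun a j =>
      a ++ [PySem.List.pyGetD (PySem.List.pyGetD matrix j []) i ' ']) acc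
    (PySem.List.pyRange i (w - i - 1) 1).foldl (fun a j =>
      a ++ [PySem.List.pyGetD (PySem.List.pyGetD matrix i []) j ' ']) acc) []

-- the [[' ' ...] ...] comprehension of decrypt
def initMatrixA (w h : Int) : List (List Char) :=
  (PySem.List.pyRange 0 h 1).foldl (fun m _ =>
    m ++ [(PySem.List.pyRange 0 w 1).foldl (fun r _ => r ++ [' ']) []]) []

-- one write 'plain_text_matrix[r][c] = text[idx]; idx += 1' (in range under Pre_)
def writeA (chars : List Char) (st : List (List Char) × Int) (r c : Int) : List (List Char) × Int :=
  (PySem.List.pySetD st.1 r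
     (PySem.List.pySetD (PySem.List.pyGetD st.1 r []) c (PySem.List.pyGetD chars st.2 ' ')),
   st.2 + 1)

-- the spiral write loop of decrypt
def spiralWriteA (chars : List Char) (w h d : Int) (st : List (List Char) × Int) : List (List Char) × Int :=
  (PySem.List.pyRange 0 d 1).foldl (fun st i =>
    let st := (PySem.List.pyRange i (h - i - 1) 1).foldl (fun st j => writeA chars st j (w - i - 1)) st
    let st := (PySem.List.pyRange (w - i - 1) i (-1)).foldl (fun st j => writeA chars st (h - i - 1) j) st
    let st := (PySem.List.pyRange (h - i - 1) i (-1)).foldl (fun st j => writeA chars st j i) st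
    (PySem.List.pyRange i (w - i - 1) 1).foldl (fun st j => writeA chars st i j) st) st

-- the row-major 'plain_text +=' loop of decrypt
def flattenA (mat : List (List Char)) (w h : Int) : List Char :=
  (PySem.List.pyRange 0 h 1).foldl (fun acc i =>
    (PySem.List.pyRange 0 w 1).foldl (fun a j =>
      a ++ [PySem.List.pyGetD (PySem.List.pyGetD mat i []) j ' ']) acc) []

def route_cipher (text : String) (mode : String) (step_size : Int) : Option String :=
  if mode = "encrypt" then
    if step_size = 0 then none   -- math.ceil(len(text)/0): ZeroDivisionError
    else
      let chars := text.toList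
      let n : Int := PySem.List.len chars
      let h : Int := -(PySem.Int.floordiv (-n) step_size)   -- math.ceil(n / step_size)
      let matrix := buildMatrixA chars step_size h
      let w : Int := PySem.List.len (PySem.List.pyGetD matrix 0 [])   -- matrix[0]: in range under Pre_
      let hh : Int := PySem.List.len matrix
      let d : Int := PySem.Int.floordiv (min w hh) 2
      some (String.ofList (spiralReadA matrix w hh d))
  else if mode = "decrypt" then
    if step_size = 0 then none   -- math.ceil(len(text)/0): ZeroDivisionError
    else
      let chars := text.toList
      let n : Int := PySem.List.len chars
      let w : Int := step_size
      let h : Int := -(PySem.Int.floordiv (-n) step_size)   -- math.ceil(n / step_size)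
      let d : Int := PySem.Int.floordiv (min w h) 2
      let st := spiralWriteA chars w h d (initMatrixA w h, 0)
      let plain := flattenA st.1 w h
      some (String.ofList (PySem.Chars.strip (PySem.Chars.replace plain ['-'] [])))
  else none

-- ===== PORT B =====
-- B-side helper: Source B's nested rank(r, c) — the closed-form spiral position of a cell
def rankB (w h d r c : Int) : Option Int :=
  let i := min (min r c) (min (h - 1 - r) (w - 1 - c))
  if i ≥ d then none
  else
    let base := 2 * i * (w + h - 2) - 4 * i * (i - 1)
    if c = w - 1 - i ∧ r < h - 1 - i then some (base + (r - i))
    else if r = h - 1 - i then some (base + (h - 2 * i - 1) + (w - 1 - i - c))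
    else if c = i then some (base + (h - 2 * i - 1) + (w - 2 * i - 1) + (h - 1 - i - r))
    else some (base + 2 * (h - 2 * i - 1) + (w - 2 * i - 1) + (c - i))

-- Source B's encrypt loop: collect (rank, char) for every cell whose rank is defined
def cellsB (chars : List Char) (w h d : Int) : List (Int × Char) :=
  (PySem.List.pyRange 0 h 1).foldl (fun acc r =>
    (PySem.List.pyRange 0 w 1).foldl (fun acc c =>
      match rankB w h d r c with
      | some k => acc ++ [(k, if r * w + c < (chars.length : Int) then PySem.List.pyGetD chars (r * w + c) '-' else '-')]
      | none => acc) acc) []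

-- Source B's decrypt loop: one character per row-major cell
def plainB (chars : List Char) (w h d : Int) : List Char :=
  (PySem.List.pyRange 0 h 1).foldl (fun acc r =>
    (PySem.List.pyRange 0 w 1).foldl (fun acc c =>
      acc ++ [match rankB w h d r c with
              | some k => PySem.List.pyGetD chars k ' '   -- text[k]: in range under Pre_
              | none => ' ']) acc) []

def route_cipher_alt (text : String) (mode : String) (step_size : Int) : Option String :=
  if mode = "encrypt" then
    if step_size = 0 then none   -- -(-n // 0): ZeroDivisionError
    else
      let chars := text.toList
      let n : Int := PySem.List.len chars
      let w : Int := step_size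
      let h : Int := -(PySem.Int.floordiv (-n) w)
      let d : Int := PySem.Int.floordiv (min w h) 2
      some (String.ofList ((PySem.List.sorted (cellsB chars w h d) (fun p => p.1) false).map (fun p => p.2)))
  else if mode = "decrypt" then
    if step_size = 0 then none   -- -(-n // 0): ZeroDivisionError
    else
      let chars := text.toList
      let n : Int := PySem.List.len chars
      let w : Int := step_size
      let h : Int := -(PySem.Int.floordiv (-n) w)
      let d : Int := PySem.Int.floordiv (min w h) 2
      some (String.ofList (PySem.Chars.strip (PySem.Chars.replace (plainB chars w h d) ['-'] [])))
  else none

-- ===== PRECONDITION & SPEC =====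
-- number of cells the spiral visits for a w × h matrix (closed form)
def spiralLenP (w h : Int) : Int :=
  2 * PySem.Int.floordiv (min w h) 2 * (w + h - 2 * PySem.Int.floordiv (min w h) 2)

-- A raises outside Pre_: encrypt with empty text or step_size ≤ 0 (IndexError on matrix[0] /
-- ZeroDivisionError), decrypt with step_size = 0 (ZeroDivisionError) or, for step_size ≥ 1,
-- a text shorter than the number of spiral cells (IndexError on text[idx]).
def Pre_route_cipher (text : String) (mode : String) (step_size : Int) : Prop :=
  (mode = "encrypt" → 1 ≤ step_size ∧ 1 ≤ text.toList.length) ∧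
  (mode = "decrypt" → step_size ≠ 0 ∧ (1 ≤ step_size →
    spiralLenP step_size (-(PySem.Int.floordiv (-(text.toList.length : Int)) step_size))
      ≤ (text.toList.length : Int)))
instance (text : String) (mode : String) (step_size : Int) : Decidable (Pre_route_cipher text mode step_size) := by unfold Pre_route_cipher; infer_instance

def pvWitness_route_cipher : String × String × Int := ("abcdef", "encrypt", 2)

def Spec_route_cipher (text : String) (mode : String) (step_size : Int) (out : Option String) : Prop := out = route_cipher_alt text mode step_size
instance (text : String) (mode : String) (step_size : Int) (out : Option String) : Decidable (Spec_route_cipher text mode step_size out) := by unfold Spec_route_cipher; infer_instance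

-- ===== CLAIM (what is proved, stated in full; the proofs are below) =====
def Claim_equal_route_cipher : Prop := ∀ (text : String) (mode : String) (step_size : Int), Dom_route_cipher text mode step_size → Pre_route_cipher text mode step_size → Spec_route_cipher text mode step_size (route_cipher text mode step_size)

-- ===== LEMMAS AND PROOFS =====

-- a w × h matrix of cell values f, as A's loops produce it
def mkGrid (w h : Int) (f : Int × Int → Char) : List (List Char) :=
  (PySem.List.pyRange 0 h 1).map (fun r => (PySem.List.pyRange 0 w 1).map (fun c => f (r, c)))

-- the coordinates one spiral layer of A visits (its four inner loops)
def layerCoords (w h i : Int) : List (Int × Int) :=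
  (PySem.List.pyRange i (h - i - 1) 1).map (fun j => (j, w - i - 1)) ++
  ((PySem.List.pyRange (w - i - 1) i (-1)).map (fun j => (h - i - 1, j)) ++
   ((PySem.List.pyRange (h - i - 1) i (-1)).map (fun j => (j, i)) ++
    (PySem.List.pyRange i (w - i - 1) 1).map (fun j => (i, j))))

-- the full spiral coordinate sequence of A
def spiralS (w h d : Int) : List (Int × Int) :=
  (PySem.List.pyRange 0 d 1).flatMap (layerCoords w h)

-- number of spiral cells strictly before layer i
def baseR (w h i : Int) : Int := 2 * i * (w + h - 2) - 4 * i * (i - 1)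

-- the rank of a cell as a bare function of the cell
def rankF (w h d : Int) (rc : Int × Int) : Option Int := rankB w h d rc.1 rc.2

-- the character A's padded matrix holds at a cell
def valE (chars : List Char) (s : Int) (rc : Int × Int) : Char :=
  if rc.1 * s + rc.2 < (chars.length : Int) then PySem.List.pyGetD chars (rc.1 * s + rc.2) '-' else '-'

-- all cells in row-major order (the iteration order of B's two loops)
def rowMajor (w h : Int) : List (Int × Int) :=
  (PySem.List.pyRange 0 h 1).flatMap (fun r => (PySem.List.pyRange 0 w 1).map (fun c => (r, c)))

theorem rkRight (w h d i r : Int) (hid : i < d) (h2 : 2 * (i + 1) ≤ min w h)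
    (h1 : i ≤ r) (h2r : r < h - 1 - i) :
    rankB w h d r (w - 1 - i) = some (baseR w h i + (r - i)) := by
  have hmin : min (min r (w - 1 - i)) (min (h - 1 - r) (w - 1 - (w - 1 - i))) = i := by omega
  simp only [rankB, hmin, baseR, true_and]
  split_ifs <;> first | rfl | (exact congrArg some (by linarith)) | omega
theorem rkBottom (w h d i c : Int) (hid : i < d) (h2 : 2 * (i + 1) ≤ min w h)
    (h1 : i < c) (h2c : c ≤ w - 1 - i) :
    rankB w h d (h - 1 - i) c = some (baseR w h i + (h - 2 * i - 1) + (w - 1 - i - c)) := by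
  have hmin : min (min (h - 1 - i) c) (min (h - 1 - (h - 1 - i)) (w - 1 - c)) = i := by omega
  simp only [rankB, hmin, baseR]
  split_ifs <;> first | rfl | (exact congrArg some (by linarith)) | omega
theorem rkLeft (w h d i r : Int) (hid : i < d) (h2 : 2 * (i + 1) ≤ min w h)
    (h1 : i < r) (h2r : r ≤ h - 1 - i) :
    rankB w h d r i = some (baseR w h i + (h - 2 * i - 1) + (w - 2 * i - 1) + (h - 1 - i - r)) := by
  have hmin : min (min r i) (min (h - 1 - r) (w - 1 - i)) = i := by omega
  simp only [rankB, hmin, baseR]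
  split_ifs <;> first | rfl | (exact congrArg some (by linarith)) | omega
theorem rkTop (w h d i c : Int) (hid : i < d) (h2 : 2 * (i + 1) ≤ min w h)
    (h1 : i ≤ c) (h2c : c < w - 1 - i) :
    rankB w h d i c = some (baseR w h i + 2 * (h - 2 * i - 1) + (w - 2 * i - 1) + (c - i)) := by
  have hmin : min (min i c) (min (h - 1 - i) (w - 1 - c)) = i := by omega
  simp only [rankB, hmin, baseR]
  split_ifs <;> first | rfl | (exact congrArg some (by linarith)) | omega
theorem map_some_add (a b t : Int) :
    (PySem.List.pyRange a b 1).map (fun j => some (j + t)) = (PySem.List.pyRange (a + t) (b + t) 1).map some := by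
  rw [PySem.List.pyRange_one, PySem.List.pyRange_one]
  simp only [List.map_map]
  rw [show (b + t - (a + t)).toNat = (b - a).toNat by omega]
  apply List.map_congr_left
  intro k _
  simp only [Function.comp_apply, Option.some.injEq]
  ring
theorem map_some_sub (a b t : Int) :
    (PySem.List.pyRange a b (-1)).map (fun j => some (t - j)) = (PySem.List.pyRange (t - a) (t - b) 1).map some := by
  rw [PySem.List.pyRange_neg_one, PySem.List.pyRange_one]
  simp only [List.map_map]
  rw [show (t - b - (t - a)).toNat = (a - b).toNat by omega]
  apply List.map_congr_left
  intro k _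
  simp only [Function.comp_apply, Option.some.injEq]
  ring

theorem layer_map_rank (w h d i : Int) (hid : i < d) (h2 : 2 * (i + 1) ≤ min w h) :
    (layerCoords w h i).map (rankF w h d) = (PySem.List.pyRange (baseR w h i) (baseR w h (i + 1)) 1).map some := by
  simp only [layerCoords, List.map_append, List.map_map]
  have e1 : (PySem.List.pyRange i (h - i - 1) 1).map ((rankF w h d) ∘ (fun j => (j, w - i - 1)))
      = (PySem.List.pyRange (baseR w h i) (baseR w h i + (h - 2 * i - 1)) 1).map some := by
    have m1 := map_some_add i (h - i - 1) (baseR w h i - i)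
    rw [show i + (baseR w h i - i) = baseR w h i by ring,
        show h - i - 1 + (baseR w h i - i) = baseR w h i + (h - 2 * i - 1) by ring] at m1
    rw [← m1]
    apply List.map_congr_left
    intro j hj
    rw [PySem.List.mem_pyRange_one] at hj
    show rankB w h d j (w - i - 1) = _
    rw [show (w - i - 1 : Int) = w - 1 - i by ring, rkRight w h d i j hid h2 hj.1 (by omega)]
    exact congrArg some (by ring)
  have e2 : (PySem.List.pyRange (w - i - 1) i (-1)).map ((rankF w h d) ∘ (fun j => (h - i - 1, j)))
      = (PySem.List.pyRange (baseR w h i + (h - 2 * i - 1)) (baseR w h i + (h - 2 * i - 1) + (w - 2 * i - 1)) 1).map some := by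
    have m1 := map_some_sub (w - i - 1) i (baseR w h i + (h - 2 * i - 1) + (w - 1 - i))
    rw [show baseR w h i + (h - 2 * i - 1) + (w - 1 - i) - (w - i - 1) = baseR w h i + (h - 2 * i - 1) by ring,
        show baseR w h i + (h - 2 * i - 1) + (w - 1 - i) - i = baseR w h i + (h - 2 * i - 1) + (w - 2 * i - 1) by ring] at m1
    rw [← m1]
    apply List.map_congr_left
    intro j hj
    rw [PySem.List.mem_pyRange_neg_one] at hj
    show rankB w h d (h - i - 1) j = _
    rw [show (h - i - 1 : Int) = h - 1 - i by ring, rkBottom w h d i j hid h2 hj.1 (by omega)]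
    exact congrArg some (by ring)
  have e3 : (PySem.List.pyRange (h - i - 1) i (-1)).map ((rankF w h d) ∘ (fun j => (j, i)))
      = (PySem.List.pyRange (baseR w h i + (h - 2 * i - 1) + (w - 2 * i - 1)) (baseR w h i + 2 * (h - 2 * i - 1) + (w - 2 * i - 1)) 1).map some := by
    have m1 := map_some_sub (h - i - 1) i (baseR w h i + (h - 2 * i - 1) + (w - 2 * i - 1) + (h - 1 - i))
    rw [show baseR w h i + (h - 2 * i - 1) + (w - 2 * i - 1) + (h - 1 - i) - (h - i - 1) = baseR w h i + (h - 2 * i - 1) + (w - 2 * i - 1) by ring,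
        show baseR w h i + (h - 2 * i - 1) + (w - 2 * i - 1) + (h - 1 - i) - i = baseR w h i + 2 * (h - 2 * i - 1) + (w - 2 * i - 1) by ring] at m1
    rw [← m1]
    apply List.map_congr_left
    intro j hj
    rw [PySem.List.mem_pyRange_neg_one] at hj
    show rankB w h d j i = _
    rw [rkLeft w h d i j hid h2 hj.1 (by omega)]
    exact congrArg some (by ring)
  have e4 : (PySem.List.pyRange i (w - i - 1) 1).map ((rankF w h d) ∘ (fun j => (i, j)))
      = (PySem.List.pyRange (baseR w h i + 2 * (h - 2 * i - 1) + (w - 2 * i - 1)) (baseR w h (i + 1)) 1).map some := by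
    have m1 := map_some_add i (w - i - 1) (baseR w h i + 2 * (h - 2 * i - 1) + (w - 2 * i - 1) - i)
    rw [show i + (baseR w h i + 2 * (h - 2 * i - 1) + (w - 2 * i - 1) - i) = baseR w h i + 2 * (h - 2 * i - 1) + (w - 2 * i - 1) by ring,
        show w - i - 1 + (baseR w h i + 2 * (h - 2 * i - 1) + (w - 2 * i - 1) - i) = baseR w h (i + 1) from by unfold baseR; ring] at m1
    rw [← m1]
    apply List.map_congr_left
    intro j hj
    rw [PySem.List.mem_pyRange_one] at hj
    show rankB w h d i j = _
    rw [rkTop w h d i j hid h2 hj.1 (by omega)]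
    exact congrArg some (by ring)
  rw [e1, e2, e3, e4, ← List.map_append, ← List.map_append, ← List.map_append]
  apply congrArg
  have hb : baseR w h (i + 1) = baseR w h i + 2 * (h - 2 * i - 1) + 2 * (w - 2 * i - 1) := by
    unfold baseR; ring
  rw [← PySem.List.pyRange_one_append _ _ _ (by omega) (by omega),
      ← PySem.List.pyRange_one_append _ _ _ (by omega) (by omega),
      ← PySem.List.pyRange_one_append _ _ _ (by omega) (by omega)]

theorem spiral_map_rank_aux (w h d : Int) (hd2 : 2 * d ≤ min w h) :
    ∀ m : Nat, (m : Int) ≤ d →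
      ((PySem.List.pyRange 0 (m : Int) 1).flatMap (layerCoords w h)).map (rankF w h d)
        = (PySem.List.pyRange 0 (baseR w h (m : Int)) 1).map some := by
  intro m
  induction m with
  | zero =>
    intro _
    simp [PySem.List.pyRange_one_eq_nil, baseR]
  | succ m ih =>
    intro hm
    have hm' : (m : Int) ≤ d := by push_cast at hm ⊢; omega
    rw [show ((m + 1 : Nat) : Int) = (m : Int) + 1 by push_cast; ring,
        PySem.List.pyRange_one_succ_right (by positivity),
        List.flatMap_append, List.map_append, ih hm']
    simp only [List.flatMap_cons, List.flatMap_nil, List.append_nil]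
    rw [layer_map_rank w h d (m : Int) (by push_cast at hm; omega) (by push_cast at hm; omega; ),
        ← List.map_append,
        ← PySem.List.pyRange_one_append 0 (baseR w h (m : Int)) (baseR w h ((m : Int) + 1)) ?h1 ?h2]
    case h1 =>
      have : baseR w h (m : Int) = 2 * (m : Int) * (w + h - 2 * (m : Int)) := by unfold baseR; ring
      rw [this]
      have hmn : (0 : Int) ≤ (m : Int) := by positivity
      apply mul_nonneg (by omega) (by omega)
    case h2 =>
      have hb : baseR w h ((m : Int) + 1) = baseR w h (m : Int) + 2 * (h - 2 * (m : Int) - 1) + 2 * (w - 2 * (m : Int) - 1) := by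
        unfold baseR; ring
      have hmn : (0 : Int) ≤ (m : Int) := by positivity
      push_cast at hm
      omega

theorem spiral_map_rank (w h d : Int) (hd2 : 2 * d ≤ min w h) (hd0 : 0 ≤ d) :
    (spiralS w h d).map (rankF w h d) = (PySem.List.pyRange 0 (baseR w h d) 1).map some := by
  have := spiral_map_rank_aux w h d hd2 d.toNat (by omega)
  rwa [show ((d.toNat : Int)) = d by omega] at this
theorem baseR_nonneg (w h d : Int) (hd2 : 2 * d ≤ min w h) (hd0 : 0 ≤ d) : 0 ≤ baseR w h d := by
  have : baseR w h d = 2 * d * (w + h - 2 * d) := by unfold baseR; ring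
  rw [this]
  exact mul_nonneg (by omega) (by omega)

-- the same fact, stated with the list's own length (valid for every d)
theorem spiral_map_rank' (w h d : Int) (hd2 : 2 * d ≤ min w h) :
    (spiralS w h d).map (rankF w h d)
      = (PySem.List.pyRange 0 ((spiralS w h d).length : Int) 1).map some := by
  by_cases hd : d ≤ 0
  · simp [spiralS, PySem.List.pyRange_one_eq_nil hd]
  · have h0 : (0:Int) ≤ d := by omega
    have hm := spiral_map_rank w h d hd2 h0
    have hlen : ((spiralS w h d).length : Int) = baseR w h d := by
      have := congrArg List.length hm
      simp only [List.length_map, PySem.List.length_pyRange_one] at this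
      have hb := baseR_nonneg w h d hd2 h0
      omega
    rw [hlen]
    exact hm

theorem nodup_spiralS (w h d : Int) (hd2 : 2 * d ≤ min w h) : (spiralS w h d).Nodup := by
  apply List.Nodup.of_map (rankF w h d)
  rw [spiral_map_rank' w h d hd2]
  exact (PySem.List.nodup_pyRange_one _ _).map (fun _ _ => Option.some_inj.mp)

-- every visited cell has a defined rank, in order 0,1,2,…
theorem rank_isSome_of_mem (w h d : Int) (hd2 : 2 * d ≤ min w h) (rc : Int × Int)
    (hm : rc ∈ spiralS w h d) : (rankF w h d rc).isSome := by
  have := spiral_map_rank' w h d hd2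
  have hmem : rankF w h d rc ∈ (spiralS w h d).map (rankF w h d) := List.mem_map_of_mem hm
  rw [this] at hmem
  simp only [List.mem_map] at hmem
  obtain ⟨k, _, hk⟩ := hmem
  rw [← hk]
  rfl

theorem layer_bounds (w h i : Int) (hi : 0 ≤ i)
    (h2 : 2 * (i + 1) ≤ min w h) :
    ∀ rc ∈ layerCoords w h i, 0 ≤ rc.1 ∧ rc.1 < h ∧ 0 ≤ rc.2 ∧ rc.2 < w := by
  intro rc hrc
  simp only [layerCoords, List.mem_append, List.mem_map, PySem.List.mem_pyRange_one,
    PySem.List.mem_pyRange_neg_one] at hrc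
  rcases hrc with ⟨j, hj, rfl⟩ | ⟨j, hj, rfl⟩ | ⟨j, hj, rfl⟩ | ⟨j, hj, rfl⟩ <;> simp <;> omega

theorem mem_spiralS (w h d : Int) (hd2 : 2 * d ≤ min w h) (rc : Int × Int) :
    rc ∈ spiralS w h d ↔
      (0 ≤ rc.1 ∧ rc.1 < h ∧ 0 ≤ rc.2 ∧ rc.2 < w ∧ (rankF w h d rc).isSome) := by
  obtain ⟨r, c⟩ := rc
  constructor
  · intro hm
    refine ⟨?_, ?_, ?_, ?_, rank_isSome_of_mem w h d hd2 _ hm⟩ <;>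
    · simp only [spiralS, List.mem_flatMap, PySem.List.mem_pyRange_one] at hm
      obtain ⟨i, hi, hrc⟩ := hm
      have := layer_bounds w h i hi.1 (by omega) _ hrc
      simp only at this
      omega
  · rintro ⟨h1, h2, h3, h4, h5⟩
    dsimp only at h1 h2 h3 h4
    have hmin : min (min r c) (min (h - 1 - r) (w - 1 - c)) < d := by
      by_contra hge
      have hnone : rankF w h d (r, c) = none := by
        simp only [rankF, rankB]
        rw [if_pos (by omega)]
      rw [hnone] at h5
      exact absurd h5 (by simp)
    obtain ⟨i, hio⟩ : ∃ i, i = min (min r c) (min (h - 1 - r) (w - 1 - c)) := ⟨_, rfl⟩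
    have hb : i ≤ r ∧ i ≤ c ∧ i ≤ h - 1 - r ∧ i ≤ w - 1 - c ∧
        (i = r ∨ i = c ∨ i = h - 1 - r ∨ i = w - 1 - c) := by omega
    have hid : i < d := by omega
    clear hio hmin h5
    obtain ⟨hb1, hb2, hb3, hb4, hb5⟩ := hb
    have hi0 : 0 ≤ i := by omega
    have h2i : 2 * (i + 1) ≤ min w h := by omega
    simp only [spiralS, List.mem_flatMap]
    refine ⟨i, by rw [PySem.List.mem_pyRange_one]; omega, ?_⟩
    simp only [layerCoords, List.mem_append, List.mem_map, PySem.List.mem_pyRange_one,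
      PySem.List.mem_pyRange_neg_one]
    by_cases hA : c = w - 1 - i ∧ r < h - 1 - i
    · exact Or.inl ⟨r, by omega, by exact Prod.ext (by omega) (by omega)⟩
    · by_cases hB : r = h - 1 - i
      · by_cases hc : c = i
        · -- bottom-left corner: first element of the left column
          refine Or.inr (Or.inr (Or.inl ⟨r, by omega, ?_⟩))
          exact Prod.ext (by omega) (by omega)
        · refine Or.inr (Or.inl ⟨c, by omega, ?_⟩)
          exact Prod.ext (by omega) (by omega)
      · by_cases hc : c = i
        · by_cases hr : r = i
          · -- top-left corner: first element of the top row
            refine Or.inr (Or.inr (Or.inr ⟨c, by omega, ?_⟩))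
            exact Prod.ext (by omega) (by omega)
          · refine Or.inr (Or.inr (Or.inl ⟨r, by omega, ?_⟩))
            exact Prod.ext (by omega) (by omega)
        · by_cases hr : r = i
          · refine Or.inr (Or.inr (Or.inr ⟨c, by omega, ?_⟩))
            exact Prod.ext (by omega) (by omega)
          · exact Or.inl ⟨r, by omega, by exact Prod.ext (by omega) (by omega)⟩

theorem floordiv_two_le (m : Int) : 2 * PySem.Int.floordiv m 2 ≤ m ∧ PySem.Int.floordiv m 2 * 2 + 2 > m := by
  have h1 := PySem.Int.floordiv_mul_add_mod m 2
  have h2 := PySem.Int.mod_nonneg m (b := 2) (by norm_num)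
  have h3 := PySem.Int.mod_lt m (b := 2) (by norm_num)
  omega

theorem spiral_bounds (w h d : Int) (hd : 2 * d ≤ min w h) :
    ∀ rc ∈ spiralS w h d, 0 ≤ rc.1 ∧ rc.1 < h ∧ 0 ≤ rc.2 ∧ rc.2 < w := by
  intro rc hrc
  simp only [spiralS, List.mem_flatMap, PySem.List.mem_pyRange_one] at hrc
  obtain ⟨i, hi, hrc⟩ := hrc
  exact layer_bounds w h i hi.1 (by omega) rc hrc

-- a flatMap of option-singletons is a filter-then-map
theorem flatMap_option_pairs {α : Type} (l : List α) (o : α → Option Int) (v : α → Char) :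
    l.flatMap (fun x => match o x with | some k => [(k, v x)] | none => [])
      = (l.filter (fun x => (o x).isSome)).map (fun x => ((o x).getD 0, v x)) := by
  induction l with
  | nil => rfl
  | cons x l ih => cases h : o x <;> simp [h, ih]

theorem nodup_flatMap_pairs (l m : List Int) (hl : l.Nodup) (hm : m.Nodup) :
    (l.flatMap (fun r => m.map (fun c => (r, c)))).Nodup := by
  induction l with
  | nil => simp
  | cons r rs ih =>
    rw [List.nodup_cons] at hl
    simp only [List.flatMap_cons, List.nodup_append]
    refine ⟨hm.map (fun a b hab => by simpa using hab), ih hl.2, ?_⟩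
    intro p hp q hq hpq
    simp only [List.mem_map] at hp
    simp only [List.mem_flatMap, List.mem_map] at hq
    obtain ⟨c, _, rfl⟩ := hp
    obtain ⟨r', hr', c', _, hc'⟩ := hq
    apply hl.1
    have : r' = r := by
      have h2 := congrArg Prod.fst (hpq ▸ hc')
      simp only at h2
      omega
    exact this ▸ hr' 

theorem nodup_rowMajor (w h : Int) : (rowMajor w h).Nodup :=
  nodup_flatMap_pairs _ _ (PySem.List.nodup_pyRange_one 0 h) (PySem.List.nodup_pyRange_one 0 w)

theorem mem_rowMajor (w h : Int) (rc : Int × Int) :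
    rc ∈ rowMajor w h ↔ 0 ≤ rc.1 ∧ rc.1 < h ∧ 0 ≤ rc.2 ∧ rc.2 < w := by
  obtain ⟨r, c⟩ := rc
  simp only [rowMajor, List.mem_flatMap, List.mem_map, PySem.List.mem_pyRange_one, Prod.mk.injEq]
  constructor
  · rintro ⟨r', hr', c', hc', rfl, rfl⟩
    exact ⟨hr'.1, hr'.2, hc'.1, hc'.2⟩
  · rintro ⟨h1, h2, h3, h4⟩
    exact ⟨r, ⟨h1, h2⟩, c, ⟨h3, h4⟩, rfl, rfl⟩

-- the cells B keeps, in row-major order, are a permutation of A's spiral sequence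
theorem perm_visited_spiral (w h d : Int) (hd2 : 2 * d ≤ min w h) :
    ((rowMajor w h).filter (fun rc => (rankF w h d rc).isSome)).Perm (spiralS w h d) := by
  apply (List.perm_ext_iff_of_nodup ((nodup_rowMajor w h).filter _) (nodup_spiralS w h d hd2)).mpr
  intro rc
  rw [List.mem_filter, mem_rowMajor, mem_spiralS w h d hd2]
  constructor
  · rintro ⟨⟨h1, h2, h3, h4⟩, h5⟩
    exact ⟨h1, h2, h3, h4, by simpa using h5⟩
  · rintro ⟨h1, h2, h3, h4, h5⟩
    exact ⟨⟨h1, h2, h3, h4⟩, by simpa using h5⟩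


-- ===== A-side loop characterisations =====

theorem mkGrid_get (w h : Int) (f : Int × Int → Char) (r c : Int)
    (hr0 : 0 ≤ r) (hrh : r < h) (hc0 : 0 ≤ c) (hcw : c < w) :
    PySem.List.pyGetD (PySem.List.pyGetD (mkGrid w h f) r []) c ' ' = f (r, c) := by
  unfold mkGrid
  rw [PySem.List.pyGetD_map_pyRange_of_nonneg _ h r _ hr0 hrh,
      PySem.List.pyGetD_map_pyRange_of_nonneg _ w c _ hc0 hcw]

theorem mkGrid_set (w h : Int) (f : Int × Int → Char) (r c : Int) (v : Char)
    (hr0 : 0 ≤ r) (hrh : r < h) (hc0 : 0 ≤ c) (_hcw : c < w) :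
    PySem.List.pySetD (mkGrid w h f) r
        (PySem.List.pySetD (PySem.List.pyGetD (mkGrid w h f) r []) c v)
      = mkGrid w h (fun x => if x = (r, c) then v else f x) := by
  rw [show PySem.List.pyGetD (mkGrid w h f) r []
        = (PySem.List.pyRange 0 w 1).map (fun cc => f (r, cc)) from by
      unfold mkGrid
      rw [PySem.List.pyGetD_map_pyRange_of_nonneg _ h r _ hr0 hrh],
    PySem.List.pySetD_of_nonneg _ _ hc0,
    PySem.List.pySetD_of_nonneg _ _ hr0]
  apply List.ext_getElem
  · simp [mkGrid, PySem.List.length_pyRange_one]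
  · intro k hk1 hk2
    simp only [mkGrid, List.getElem_set, List.getElem_map, PySem.List.getElem_pyRange_one,
      zero_add] at *
    by_cases hkr : r.toNat = k
    · simp only [if_pos hkr]
      apply List.ext_getElem
      · simp [PySem.List.length_pyRange_one]
      · intro j hj1 hj2
        simp only [List.getElem_set, List.getElem_map, PySem.List.getElem_pyRange_one, zero_add]
        have hkk : (k : Int) = r := by omega
        by_cases hjc : c.toNat = j
        · have : ((j : Int)) = c := by omega
          simp [hjc, hkk, this]
        · have : ¬ ((j : Int)) = c := by omega
          simp only [if_neg hjc, hkk, Prod.mk.injEq, this, and_false, if_false]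
    · simp only [if_neg hkr]
      apply List.map_congr_left
      intro cc _
      have : ¬ (((k:Int), cc) = (r, c)) := by
        simp only [Prod.mk.injEq]; intro ⟨h1, _⟩; omega
      simp [this]

theorem buildMatrixA_eq (chars : List Char) (s h : Int) :
    buildMatrixA chars s h
      = mkGrid s h (fun rc => valE chars s rc) := by
  simp [buildMatrixA, mkGrid, valE, ← List.flatMap_def, ← List.map_eq_flatMap]

theorem initMatrixA_eq (w h : Int) : initMatrixA w h = mkGrid w h (fun _ => ' ') := by
  simp [initMatrixA, mkGrid]

theorem spiralReadA_eq (matrix : List (List Char)) (w hh d : Int) :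
    spiralReadA matrix w hh d
      = (spiralS w hh d).map
          (fun rc => PySem.List.pyGetD (PySem.List.pyGetD matrix rc.1 []) rc.2 ' ') := by
  simp only [spiralReadA, spiralS]
  simp [List.flatMap_def, List.map_flatten, List.map_map]
  apply congrArg List.flatten
  apply List.map_congr_left
  intro i _
  simp [layerCoords, List.map_append, List.map_map, ← List.flatMap_def, ← List.map_eq_flatMap]
  rfl

theorem spiralWriteA_eq (chars : List Char) (w h d : Int) (st : List (List Char) × Int) :
    spiralWriteA chars w h d st
      = (spiralS w h d).foldl (fun st rc => writeA chars st rc.1 rc.2) st := by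
  simp only [spiralWriteA, spiralS]
  rw [List.foldl_flatMap]
  apply PySem.List.foldl_congr_mem
  intro st i _
  simp [layerCoords, List.foldl_append, List.foldl_map]

theorem flattenA_eq (mat : List (List Char)) (w h : Int) :
    flattenA mat w h
      = (PySem.List.pyRange 0 h 1).flatMap (fun r =>
          (PySem.List.pyRange 0 w 1).map (fun c =>
            PySem.List.pyGetD (PySem.List.pyGetD mat r []) c ' ')) := by
  simp [flattenA, List.flatMap_def]
  apply congrArg List.flatten
  apply List.map_congr_left
  intro i _
  simp [← List.flatMap_def, ← List.map_eq_flatMap]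

-- the simulation: A's in-place matrix writes match a coordinate-keyed dict built along the spiral
theorem sim_write (chars : List Char) (w h : Int) :
    ∀ (cs : List (Int × Int)),
      (∀ rc ∈ cs, 0 ≤ rc.1 ∧ rc.1 < h ∧ 0 ≤ rc.2 ∧ rc.2 < w) →
      ∀ (g : PySem.Dict (Int × Int) Char) (k : Int),
      cs.foldl (fun st rc => writeA chars st rc.1 rc.2)
          (mkGrid w h (fun rc => g.getD rc ' '), k)
        = (mkGrid w h (fun rc =>
             ((PySem.List.enumerate cs k).foldl
                (fun g p => g.insert p.2 (PySem.List.pyGetD chars p.1 ' ')) g).getD rc ' '),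
           k + cs.length) := by
  intro cs
  induction cs with
  | nil => intro _ g k; simp [PySem.List.enumerate]
  | cons rc cs ih =>
    obtain ⟨r, c⟩ := rc
    intro hb g k
    obtain ⟨hr0, hrh, hc0, hcw⟩ := hb (r, c) (List.mem_cons_self)
    rw [PySem.List.enumerate_cons, List.foldl_cons, List.foldl_cons]
    have hstep : writeA chars (mkGrid w h fun rc => g.getD rc ' ', k) (r, c).1 (r, c).2
        = (mkGrid w h (fun x => (g.insert (r, c) (PySem.List.pyGetD chars k ' ')).getD x ' '),
           k + 1) := by
      unfold writeA
      simp only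
      rw [mkGrid_set w h _ r c _ hr0 hrh hc0 hcw]
      congr 1
      apply congrArg
      funext x
      by_cases hx : x = (r, c)
      · subst hx; simp [PySem.Dict.getD_insert_self]
      · rw [if_neg hx, PySem.Dict.getD_insert_of_ne g _ ' ' hx]
    rw [hstep, ih (fun rc' h' => hb rc' (List.mem_cons_of_mem _ h'))
      (g.insert (r, c) (PySem.List.pyGetD chars k ' ')) (k + 1)]
    simp only [List.length_cons]
    rw [Prod.mk.injEq]
    refine ⟨rfl, by push_cast; omega⟩

theorem ceil_pos (n s : Int) (hn : 1 ≤ n) (hs : 0 < s) :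
    1 ≤ -(PySem.Int.floordiv (-n) s) := by
  have := PySem.Int.floordiv_lt_iff_lt_mul (a := -n) (b := s) (q := 0) hs
  omega

theorem mkGrid_len (w h : Int) (f : Int × Int → Char) (hh : 0 ≤ h) :
    ((mkGrid w h f).length : Int) = h := by
  simp [mkGrid, PySem.List.length_pyRange_one]
  omega

theorem mkGrid_row0_len (w h : Int) (f : Int × Int → Char) (hw : 0 ≤ w) (hh0 : 0 < h) :
    (((PySem.List.pyGetD (mkGrid w h f) 0 []).length : Int)) = w := by
  unfold mkGrid
  rw [PySem.List.pyGetD_map_pyRange_of_nonneg _ h 0 _ le_rfl hh0]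
  simp [PySem.List.length_pyRange_one]
  omega

theorem final_eq {X Y : List Char} (hxy : X = Y) :
    (some (String.ofList (PySem.Chars.strip (PySem.Chars.replace X ['-'] []))) : Option String)
      = some (String.ofList (PySem.Chars.strip (PySem.Chars.replace Y ['-'] []))) := by rw [hxy]

theorem pair_fst {α β : Type} (a : α) (b : β) : (a, b).1 = a := rfl

theorem flatten_read_eq (G : PySem.Dict (Int × Int) Char) (w h : Int) :
    flattenA (mkGrid w h (fun rc => G.getD rc ' ')) w h
      = (PySem.List.pyRange 0 h 1).flatMap (fun r =>
          (PySem.List.pyRange 0 w 1).map (fun c => G.getD (r, c) ' ')) := by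
  rw [flattenA_eq]
  apply List.flatMap_congr
  intro r hr
  apply List.map_congr_left
  intro c hc
  simp only [PySem.List.mem_pyRange_one] at hr hc
  exact mkGrid_get w h _ r c hr.1 hr.2 hc.1 hc.2

-- looking up a cell in the dict built by inserting along a rank-ordered list
theorem dict_lookup (chars : List Char) (rankFn : Int × Int → Option Int) :
    ∀ (l : List (Int × Int)) (k0 : Int) (g : PySem.Dict (Int × Int) Char),
      (l.map rankFn = (PySem.List.pyRange k0 (k0 + l.length) 1).map some) →
      ∀ rc, ((PySem.List.enumerate l k0).foldl
               (fun g p => g.insert p.2 (PySem.List.pyGetD chars p.1 ' ')) g).getD rc ' '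
        = if rc ∈ l then PySem.List.pyGetD chars ((rankFn rc).getD 0) ' ' else g.getD rc ' ' := by
  intro l
  induction l with
  | nil => intro k0 g _ rc; simp [PySem.List.enumerate]
  | cons x l ih =>
    intro k0 g hmap rc
    have hcons : PySem.List.pyRange k0 (k0 + ((x :: l).length : Int)) 1
        = k0 :: PySem.List.pyRange (k0 + 1) (k0 + 1 + (l.length : Int)) 1 := by
      rw [PySem.List.pyRange_one_cons (by simp only [List.length_cons]; push_cast; omega)]
      congr 2
      simp only [List.length_cons]
      push_cast
      ring
    rw [hcons] at hmap
    simp only [List.map_cons, List.cons.injEq] at hmap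
    obtain ⟨hx, hl⟩ := hmap
    rw [PySem.List.enumerate_cons, List.foldl_cons,
        ih (k0 + 1) (g.insert x (PySem.List.pyGetD chars k0 ' ')) hl rc]
    by_cases hmem : rc ∈ l
    · rw [if_pos hmem, if_pos (List.mem_cons_of_mem _ hmem)]
    · rw [if_neg hmem]
      by_cases hxe : rc = x
      · subst hxe
        rw [if_pos (List.mem_cons_self), PySem.Dict.getD_insert_self, hx]
        rfl
      · rw [PySem.Dict.getD_insert_of_ne g _ ' ' hxe,
            if_neg (by simp [hxe, hmem])]

-- ===== the two modes =====

-- B's encrypt loops build exactly the (rank, char) pairs of the visited row-major cells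
-- B's conditional-append inner loop ('if k is not None: cells.append(…)'), as a flatMap
theorem foldl_rank_append (chars : List Char) (s H d r : Int) :
    ∀ (l : List Int) (acc : List (Int × Char)),
      l.foldl (fun acc c => match rankB s H d r c with
          | some k => acc ++ [(k, if r * s + c < (chars.length : Int) then PySem.List.pyGetD chars (r * s + c) '-' else '-')]
          | none => acc) acc
        = acc ++ l.flatMap (fun c => match rankB s H d r c with
          | some k => [(k, if r * s + c < (chars.length : Int) then PySem.List.pyGetD chars (r * s + c) '-' else '-')]
          | none => []) := by
  intro l
  induction l with
  | nil => intro acc; simp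
  | cons c l ih =>
    intro acc
    cases hk : rankB s H d r c <;> simp [hk, ih]

theorem cellsB_eq (chars : List Char) (s H d : Int) :
    cellsB chars s H d
      = ((rowMajor s H).filter (fun rc => (rankF s H d rc).isSome)).map
          (fun rc => ((rankF s H d rc).getD 0, valE chars s rc)) := by
  unfold cellsB
  rw [PySem.List.foldl_congr_mem (g := fun acc r => acc ++
        (PySem.List.pyRange 0 s 1).flatMap (fun c =>
          match rankB s H d r c with
          | some k => [(k, if r * s + c < (chars.length : Int) then PySem.List.pyGetD chars (r * s + c) '-' else '-')]
          | none => []))]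
  · rw [PySem.List.foldl_append_eq_flatMap, List.nil_append, ← flatMap_option_pairs]
    unfold rowMajor
    rw [List.flatMap_assoc]
    apply List.flatMap_congr
    intro r _
    rw [List.flatMap_map]
    apply List.flatMap_congr
    intro c _
    cases hk : rankB s H d r c <;> simp [rankF, hk, valE]
  · intro acc r _
    exact foldl_rank_append chars s H d r (PySem.List.pyRange 0 s 1) acc

theorem encrypt_eq (text : String) (s : Int) (hs : 1 ≤ s) (hl : 1 ≤ text.toList.length) :
    route_cipher text "encrypt" s = route_cipher_alt text "encrypt" s := by
  have hs0 : s ≠ 0 := by omega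
  simp only [route_cipher, route_cipher_alt, reduceIte, if_neg hs0, PySem.List.len_eq]
  have hh1 : 1 ≤ -(PySem.Int.floordiv (-((text.toList.length : Int))) s) :=
    ceil_pos _ _ (by exact_mod_cast hl) (by omega)
  generalize hH : -(PySem.Int.floordiv (-((text.toList.length : Int))) s) = H at *
  rw [buildMatrixA_eq, mkGrid_row0_len _ _ _ (by omega) (by omega), mkGrid_len _ _ _ (by omega),
      spiralReadA_eq]
  have hd2 : 2 * (PySem.Int.floordiv (min s H) 2) ≤ min s H := (floordiv_two_le _).1
  generalize hd : PySem.Int.floordiv (min s H) 2 = d at *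
  congr 1
  apply congrArg String.ofList
  have hA : (spiralS s H d).map
        (fun rc => PySem.List.pyGetD (PySem.List.pyGetD (mkGrid s H (fun rc => valE text.toList s rc)) rc.1 []) rc.2 ' ')
      = (spiralS s H d).map (valE text.toList s) := by
    apply List.map_congr_left
    intro rc hrc
    obtain ⟨b1, b2, b3, b4⟩ := spiral_bounds s H d hd2 rc hrc
    rw [mkGrid_get s H _ rc.1 rc.2 b1 b2 b3 b4]
  rw [hA]
  have hkeys : (((spiralS s H d).map
        (fun rc => ((rankF s H d rc).getD 0, valE text.toList s rc))).map (fun p => p.1))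
      = PySem.List.pyRange 0 ((spiralS s H d).length : Int) 1 := by
    rw [List.map_map]
    have hmr := congrArg (List.map (fun o : Option Int => o.getD 0)) (spiral_map_rank' s H d hd2)
    simp only [List.map_map] at hmr
    rw [show ((fun p : Int × Char => p.1) ∘ (fun rc => ((rankF s H d rc).getD 0, valE text.toList s rc)))
          = ((fun o : Option Int => o.getD 0) ∘ rankF s H d) from rfl, hmr]
    simp
  have hpairwise : ((spiralS s H d).map
        (fun rc => ((rankF s H d rc).getD 0, valE text.toList s rc))).Pairwise
          (fun a b => a.1 < b.1) := by
    have hp := PySem.List.pairwise_lt_pyRange_one 0 ((spiralS s H d).length : Int)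
    rw [← hkeys] at hp
    exact List.pairwise_map.mp hp
  have hperm : ((spiralS s H d).map
        (fun rc => ((rankF s H d rc).getD 0, valE text.toList s rc))).Perm
      (((rowMajor s H).filter (fun rc => (rankF s H d rc).isSome)).map
        (fun rc => ((rankF s H d rc).getD 0, valE text.toList s rc))) :=
    ((perm_visited_spiral s H d hd2).symm).map _
  have hsorted : PySem.List.sorted (cellsB text.toList s H d) (fun p : Int × Char => p.1) false
      = (spiralS s H d).map (fun rc => ((rankF s H d rc).getD 0, valE text.toList s rc)) := by
    rw [cellsB_eq]
    exact PySem.List.sorted_eq_of_perm_of_pairwise_lt _ _ (fun p : Int × Char => p.1) hperm hpairwise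
  rw [hsorted, List.map_map]
  rfl

-- B's append loop for one decrypt row, as a map
theorem plainB_row (chars : List Char) (s H d r : Int) :
    ∀ (l : List Int) (acc : List Char),
      l.foldl (fun acc c => acc ++ [match rankB s H d r c with
          | some k => PySem.List.pyGetD chars k ' '
          | none => ' ']) acc
        = acc ++ l.map (fun c => match rankB s H d r c with
          | some k => PySem.List.pyGetD chars k ' '
          | none => ' ') := by
  intro l
  induction l with
  | nil => intro acc; simp
  | cons c l ih => intro acc; simp [ih]

theorem plainB_eq (chars : List Char) (s H d : Int) :
    plainB chars s H d
      = (PySem.List.pyRange 0 H 1).flatMap (fun r =>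
          (PySem.List.pyRange 0 s 1).map (fun c =>
            match rankB s H d r c with
            | some k => PySem.List.pyGetD chars k ' '
            | none => ' ')) := by
  unfold plainB
  rw [PySem.List.foldl_congr_mem (g := fun acc r => acc ++
        (PySem.List.pyRange 0 s 1).map (fun c =>
          match rankB s H d r c with
          | some k => PySem.List.pyGetD chars k ' '
          | none => ' '))]
  · rw [PySem.List.foldl_append_eq_flatMap, List.nil_append]
  · intro acc r _
    exact plainB_row chars s H d r (PySem.List.pyRange 0 s 1) acc

set_option maxHeartbeats 1000000 in
theorem decrypt_eq (text : String) (s : Int) (hs : s ≠ 0) :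
    route_cipher text "decrypt" s = route_cipher_alt text "decrypt" s := by
  have hne : ¬ (("decrypt" : String) = "encrypt") := by decide
  simp only [route_cipher, route_cipher_alt, reduceIte, if_neg hne, if_neg hs, PySem.List.len_eq]
  apply final_eq
  generalize -(PySem.Int.floordiv (-((text.toList.length : Int))) s) = H
  have hd2 : 2 * (PySem.Int.floordiv (min s H) 2) ≤ min s H := (floordiv_two_le _).1
  generalize hd : PySem.Int.floordiv (min s H) 2 = d at *
  rw [initMatrixA_eq,
    show mkGrid s H (fun _ => ' ')
        = mkGrid s H (fun rc => (PySem.Dict.empty (κ := Int × Int) (ν := Char)).getD rc ' ') from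
      congrArg _ (funext fun x => (PySem.Dict.getD_empty x ' ').symm),
    spiralWriteA_eq,
    sim_write text.toList s H (spiralS s H d) (spiral_bounds s H d hd2) PySem.Dict.empty 0,
    pair_fst, flatten_read_eq, plainB_eq]
  have hmap : (spiralS s H d).map (rankF s H d)
      = (PySem.List.pyRange 0 (0 + ((spiralS s H d).length : Int)) 1).map some := by
    rw [zero_add]
    exact spiral_map_rank' s H d hd2
  apply List.flatMap_congr
  intro r hr
  apply List.map_congr_left
  intro c hc
  rw [PySem.List.mem_pyRange_one] at hr hc
  rw [dict_lookup text.toList (rankF s H d) (spiralS s H d) 0 PySem.Dict.empty hmap (r, c)]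
  cases hk : rankB s H d r c with
  | some k =>
    rw [if_pos ((mem_spiralS s H d hd2 (r, c)).mpr
      ⟨hr.1, hr.2, hc.1, hc.2, by simp [rankF, hk]⟩)]
    simp [rankF, hk]
  | none =>
    rw [if_neg (fun hmem => by
      have := ((mem_spiralS s H d hd2 (r, c)).mp hmem).2.2.2.2
      simp [rankF, hk] at this)]
    simp [PySem.Dict.getD_empty]

-- ===== VERDICT (by name: the statement is the Claim_ definition above) =====
theorem route_cipher_spec : Claim_equal_route_cipher := by
  intro text mode step_size _hdom hpre
  unfold Spec_route_cipher
  by_cases he : mode = "encrypt"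
  · subst he
    exact encrypt_eq text step_size (hpre.1 rfl).1 (hpre.1 rfl).2
  · by_cases hd : mode = "decrypt"
    · subst hd
      exact decrypt_eq text step_size (hpre.2 rfl).1
    · simp [route_cipher, route_cipher_alt, he, hd]
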